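-- pv_equiv track=rewrite | github.com/datawizard1337/ARGUS | build/lib/ARGUS/spiders/textspider.py | reorderUrlstack
-- ===== SOURCE A (Python) =====
-- def reorderUrlstack(urlstack):
--    german = []
--    other = []
--    for url in urlstack:
--        if "/de/" in url or "/de-de/" in url or "/ger/" in url or "?lang=de" in url:
--            german.append(url)
--        else:
--            other.append(url)
--    urlstack = sorted(german, key=len) + sorted(other, key=len)
--    return urlstack
-- ===== SOURCE B (Python) =====
-- def reorderUrlstack(urlstack):
--     def is_german(url):
--         return "/de/" in url or "/de-de/" in url or "/ger/" in url or "?lang=de" in url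
--     return sorted(urlstack, key=lambda u: (0 if is_german(u) else 1, len(u)))
-- ===== Notes on version B (the rewrite author's own statement) =====
-- stated objective: idiomatic
-- what changed: Replaced the explicit partition into two lists followed by two separate sorts and a concatenation with one stable sort of the whole input under a composite key (german-flag, length).
import Mathlib
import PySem

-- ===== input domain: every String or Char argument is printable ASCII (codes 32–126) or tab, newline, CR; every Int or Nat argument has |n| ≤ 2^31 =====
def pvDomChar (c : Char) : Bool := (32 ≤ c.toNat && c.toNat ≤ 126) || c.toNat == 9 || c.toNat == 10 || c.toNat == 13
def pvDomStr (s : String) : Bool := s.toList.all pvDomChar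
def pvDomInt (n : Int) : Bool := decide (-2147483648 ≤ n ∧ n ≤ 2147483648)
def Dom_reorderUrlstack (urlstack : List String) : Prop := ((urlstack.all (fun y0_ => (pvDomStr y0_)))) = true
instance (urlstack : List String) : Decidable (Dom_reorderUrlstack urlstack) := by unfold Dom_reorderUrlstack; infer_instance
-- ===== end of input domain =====

-- B replaces A's partition-into-two-lists-then-two-sorts by ONE stable sort of the
-- whole input under the composite key (german-flag, length): a more idiomatic decomposition, same cost.

-- ===== PORT A =====
-- A: one loop partitioning into `german` / `other` (append at the end, as Python's .append),
-- then sorted(german, key=len) + sorted(other, key=len).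
def reorderUrlstack (urlstack : List String) : List String :=
  let go := urlstack.foldl
    (fun (acc : List String × List String) url =>
      if PySem.Str.isIn "/de/" url || PySem.Str.isIn "/de-de/" url ||
         PySem.Str.isIn "/ger/" url || PySem.Str.isIn "?lang=de" url
      then (acc.1 ++ [url], acc.2)
      else (acc.1, acc.2 ++ [url]))
    ([], [])
  PySem.List.sorted go.1 (fun u => PySem.Str.len u) ++
    PySem.List.sorted go.2 (fun u => PySem.Str.len u)

-- ===== PORT B =====
def pvIsGerman (url : String) : Bool :=
  PySem.Str.isIn "/de/" url || PySem.Str.isIn "/de-de/" url ||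
    PySem.Str.isIn "/ger/" url || PySem.Str.isIn "?lang=de" url

-- B: sorted(urlstack, key=lambda u: (0 if is_german(u) else 1, len(u)))
def reorderUrlstack_alt (urlstack : List String) : List String :=
  PySem.List.sorted2 urlstack
    (fun u => if pvIsGerman u then (0 : Int) else 1)
    (fun u => PySem.Str.len u)

-- ===== PRECONDITION & SPEC =====
def Spec_reorderUrlstack (urlstack : List String) (out : List String) : Prop := out = reorderUrlstack_alt urlstack
instance (urlstack : List String) (out : List String) : Decidable (Spec_reorderUrlstack urlstack out) := by unfold Spec_reorderUrlstack; infer_instance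

-- ===== CLAIM (what is proved, stated in full; the proofs are below) =====
def Claim_equal_reorderUrlstack : Prop := ∀ (urlstack : List String), Dom_reorderUrlstack urlstack → Spec_reorderUrlstack urlstack (reorderUrlstack urlstack)

-- ===== LEMMAS AND PROOFS =====

-- A's partition loop builds exactly (filter p, filter !p).
theorem pvPartFoldl (p : String → Bool) (xs g o : List String) :
    xs.foldl (fun (acc : List String × List String) url =>
        if p url then (acc.1 ++ [url], acc.2) else (acc.1, acc.2 ++ [url])) (g, o)
      = (g ++ xs.filter p, o ++ xs.filter (fun u => !p u)) := by
  induction xs generalizing g o with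
  | nil => simp
  | cons x t ih =>
    by_cases h : p x = true <;> simp [List.foldl_cons, h, ih]

-- insertBy when x goes strictly before everything in bs: insertion lands inside as.
theorem pvInsertByAll {α : Type} (before : α → α → Bool) (x : α) (as bs : List α)
    (h : ∀ b ∈ bs, before x b = true) :
    PySem.List.insertBy before x (as ++ bs) = PySem.List.insertBy before x as ++ bs := by
  induction as with
  | nil =>
    cases bs with
    | nil => rfl
    | cons b t => simp [PySem.List.insertBy, h b (by simp)]
  | cons a t ih =>
    simp only [List.cons_append, PySem.List.insertBy]
    split_ifs <;> simp [ih]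

-- insertBy when x never goes before anything in as: insertion lands inside bs.
theorem pvInsertByNone {α : Type} (before : α → α → Bool) (x : α) (as bs : List α)
    (h : ∀ a ∈ as, before x a = false) :
    PySem.List.insertBy before x (as ++ bs) = as ++ PySem.List.insertBy before x bs := by
  induction as with
  | nil => rfl
  | cons a t ih =>
    simp only [List.cons_append, PySem.List.insertBy, h a (by simp)]
    simp only [Bool.false_eq_true, if_false]
    rw [ih (fun a ha => h a (by simp [ha]))]

-- insertBy only looks at comparisons of x against the list's elements.
theorem pvInsertByCongr {α : Type} (before before' : α → α → Bool) (x : α) (ys : List α)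
    (h : ∀ y ∈ ys, before x y = before' x y) :
    PySem.List.insertBy before x ys = PySem.List.insertBy before' x ys := by
  induction ys with
  | nil => rfl
  | cons y t ih =>
    simp only [PySem.List.insertBy, h y (by simp)]
    split_ifs <;> simp [ih (fun y hy => h y (by simp [hy]))]

-- sorted2's foldl/insertBy form (definitional).
theorem pvSorted2Eq (xs : List String) :
    reorderUrlstack_alt xs = xs.foldl
      (fun acc x => PySem.List.insertBy
        (fun a b =>
          decide ((if pvIsGerman a then (0 : Int) else 1) < (if pvIsGerman b then (0 : Int) else 1)) ||
          (!decide ((if pvIsGerman b then (0 : Int) else 1) < (if pvIsGerman a then (0 : Int) else 1)) &&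
            decide (PySem.Str.len a < PySem.Str.len b))) x acc) [] := rfl

-- The composite-key stable sort equals the two per-group sorts concatenated.
theorem pvMain (xs : List String) :
    reorderUrlstack_alt xs
      = PySem.List.sorted (xs.filter pvIsGerman) (fun u => PySem.Str.len u) ++
        PySem.List.sorted (xs.filter (fun u => !pvIsGerman u)) (fun u => PySem.Str.len u) := by
  induction xs using List.reverseRecOn with
  | nil => rfl
  | append_singleton t x ih =>
    rw [pvSorted2Eq] at ih ⊢
    rw [List.foldl_append, List.foldl_cons, List.foldl_nil, ih, List.filter_append,
      List.filter_append]
    rw [PySem.List.sorted_eq_foldl_insertBy, PySem.List.sorted_eq_foldl_insertBy,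
      PySem.List.sorted_eq_foldl_insertBy, PySem.List.sorted_eq_foldl_insertBy]
    by_cases h : pvIsGerman x = true
    · simp only [h, List.filter_cons, List.filter_nil, Bool.not_true, if_true, if_false,
        Bool.false_eq_true, List.append_nil, List.foldl_append, List.foldl_cons, List.foldl_nil]
      rw [pvInsertByAll _ x _ _ (by
        intro b hb
        have hb' : b ∈ t.filter (fun u => !pvIsGerman u) := by
          have := (PySem.List.mem_sorted (t.filter (fun u => !pvIsGerman u))
            (fun u => PySem.Str.len u) false b).mp
          rw [PySem.List.sorted_eq_foldl_insertBy] at this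
          exact this hb
        have hbg : pvIsGerman b = false := by
          have := List.of_mem_filter hb'
          simpa using this
        simp [h, hbg])]
      congr 1
      apply pvInsertByCongr
      intro y hy
      have hy' : y ∈ t.filter pvIsGerman := by
        have := (PySem.List.mem_sorted (t.filter pvIsGerman)
          (fun u => PySem.Str.len u) false y).mp
        rw [PySem.List.sorted_eq_foldl_insertBy] at this
        exact this hy
      have hyg : pvIsGerman y = true := List.of_mem_filter hy'
      simp [h, hyg]
    · have h' : pvIsGerman x = false := by simpa using h
      simp only [h', List.filter_cons, List.filter_nil, Bool.not_false, if_true, if_false,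
        Bool.false_eq_true, List.append_nil, List.foldl_append, List.foldl_cons, List.foldl_nil]
      rw [pvInsertByNone _ x _ _ (by
        intro a ha
        have ha' : a ∈ t.filter pvIsGerman := by
          have := (PySem.List.mem_sorted (t.filter pvIsGerman)
            (fun u => PySem.Str.len u) false a).mp
          rw [PySem.List.sorted_eq_foldl_insertBy] at this
          exact this ha
        have hag : pvIsGerman a = true := List.of_mem_filter ha'
        simp [h', hag])]
      congr 1
      apply pvInsertByCongr
      intro y hy
      have hy' : y ∈ t.filter (fun u => !pvIsGerman u) := by
        have := (PySem.List.mem_sorted (t.filter (fun u => !pvIsGerman u))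
          (fun u => PySem.Str.len u) false y).mp
        rw [PySem.List.sorted_eq_foldl_insertBy] at this
        exact this hy
      have hyg : pvIsGerman y = false := by
        have := List.of_mem_filter hy'
        simpa using this
      simp [h', hyg]

-- ===== VERDICT (by name: the statement is the Claim_ definition above) =====
theorem reorderUrlstack_spec : Claim_equal_reorderUrlstack := by
  intro urlstack _
  unfold Spec_reorderUrlstack reorderUrlstack
  rw [show (urlstack.foldl
      (fun (acc : List String × List String) url =>
        if PySem.Str.isIn "/de/" url || PySem.Str.isIn "/de-de/" url ||
           PySem.Str.isIn "/ger/" url || PySem.Str.isIn "?lang=de" url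
        then (acc.1 ++ [url], acc.2)
        else (acc.1, acc.2 ++ [url])) ([], []))
      = (urlstack.filter pvIsGerman, urlstack.filter (fun u => !pvIsGerman u)) from by
    simpa only [List.nil_append] using pvPartFoldl pvIsGerman urlstack [] []]
  rw [pvMain]
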